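-- pv_equiv track=rewrite | github.com/VladimirAnaniev/Algorithms | CodeForces/462C - Appleman and Toastman.py | solve_dyn
-- ===== SOURCE A (Python) =====
-- def solve_dyn(arr):
--     arr.sort(reverse=True)
--
--     dyn = [0] * (len(arr) + 1)
--     sums = [0] * (len(arr) + 1)
--
--     dyn[1] = arr[0]
--     sums[1] = arr[0]
--
--     for i in range(2, len(arr) + 1):
--         sums[i] = sums[i - 1] + arr[i - 1]
--         dyn[i] = dyn[i - 1] + sums[i] + arr[i - 1]
--
--     return dyn[len(arr)]
-- ===== SOURCE B (Python) =====
-- def solve_dyn(arr):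
--     arr.sort(reverse=True)
--     n = len(arr)
--     total = n * arr[0]
--     for i in range(1, n):
--         total += (n - i + 1) * arr[i]
--     return total
-- ===== Notes on version B (the rewrite author's own statement) =====
-- stated objective: simpler
-- what changed: Replaces the prefix-sum array and the DP array with a single pass that adds each sorted element times its closed-form positional weight (n for arr[0], n-i+1 for i>=1), avoiding the two auxiliary length-(n+1) lists.
import Mathlib
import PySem

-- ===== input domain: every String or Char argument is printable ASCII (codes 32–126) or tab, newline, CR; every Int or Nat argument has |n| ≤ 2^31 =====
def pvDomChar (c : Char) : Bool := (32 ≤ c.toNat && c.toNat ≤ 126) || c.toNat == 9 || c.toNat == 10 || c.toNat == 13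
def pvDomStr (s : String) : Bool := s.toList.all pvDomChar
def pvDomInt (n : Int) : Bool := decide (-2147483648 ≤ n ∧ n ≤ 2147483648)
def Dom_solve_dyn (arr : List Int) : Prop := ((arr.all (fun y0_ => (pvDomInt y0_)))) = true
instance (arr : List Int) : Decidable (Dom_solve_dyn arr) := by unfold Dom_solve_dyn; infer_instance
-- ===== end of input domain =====

-- B replaces A's prefix-sum array and DP array with a single pass using a closed-form
-- positional weight per sorted element (objective: simpler). Both sort the argument in
-- place in Python; the equivalence proved here is about the return value only.


-- ===== PORT A =====
-- loop body of A's 'for i in range(2, len(arr)+1)': state is (dyn, sums)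
def stepA (s : List Int) (st : List Int × List Int) (i : Int) : List Int × List Int :=
  let si := PySem.List.pyGetD st.2 (i - 1) 0 + PySem.List.pyGetD s (i - 1) 0
  let sums' := PySem.List.pySetD st.2 i si
  let dyn' := PySem.List.pySetD st.1 i (PySem.List.pyGetD st.1 (i - 1) 0 + si + PySem.List.pyGetD s (i - 1) 0)
  (dyn', sums')

def solve_dyn (arr : List Int) : Int :=
  let s := PySem.List.sorted arr (fun x => x) true
  let n := s.length
  let dyn0 : List Int := List.replicate (n + 1) 0
  let sums0 : List Int := List.replicate (n + 1) 0
  let dyn1 := PySem.List.pySetD dyn0 1 (PySem.List.pyGetD s 0 0)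
  let sums1 := PySem.List.pySetD sums0 1 (PySem.List.pyGetD s 0 0)
  let st := (PySem.List.pyRange 2 ((n : Int) + 1) 1).foldl (stepA s) (dyn1, sums1)
  PySem.List.pyGetD st.1 (n : Int) 0

-- ===== PORT B =====
def solve_dyn_alt (arr : List Int) : Int :=
  let s := PySem.List.sorted arr (fun x => x) true
  let n : Int := s.length
  let total := n * PySem.List.pyGetD s 0 0
  (PySem.List.pyRange 1 n 1).foldl (fun t i => t + (n - i + 1) * PySem.List.pyGetD s i 0) total

-- ===== PRECONDITION & SPEC =====
-- Pre_ excludes only the empty list, on which A raises IndexError (dyn[1] on a 1-element list);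
-- B raises IndexError there too (arr[0]).
def Pre_solve_dyn (arr : List Int) : Prop := arr ≠ []
instance (arr : List Int) : Decidable (Pre_solve_dyn arr) := by unfold Pre_solve_dyn; infer_instance
def pvWitness_solve_dyn : List Int := ([3, 1, 2])

def Spec_solve_dyn (arr : List Int) (out : Int) : Prop := out = solve_dyn_alt arr
instance (arr : List Int) (out : Int) : Decidable (Spec_solve_dyn arr out) := by unfold Spec_solve_dyn; infer_instance

-- ===== CLAIM (what is proved, stated in full; the proofs are below) =====
def Claim_equal_solve_dyn : Prop := ∀ (arr : List Int), Dom_solve_dyn arr → Pre_solve_dyn arr → Spec_solve_dyn arr (solve_dyn arr)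

-- ===== LEMMAS AND PROOFS =====

-- value dyn[k] holds after A's loop has processed i = 2..k (Dval s 0 is chosen so the
-- recurrence is uniform; only k ≥ 1 is ever used)
def Dval (s : List Int) : Nat → Int
  | 0 => -(s.getD 0 0)
  | k + 1 => Dval s k + (s.take (k + 1)).sum + s.getD k 0

theorem take_succ_sum (s : List Int) (k : Nat) :
    (s.take (k + 1)).sum = (s.take k).sum + s.getD k 0 := by
  induction s generalizing k with
  | nil => simp [List.getD]
  | cons a t ih =>
    cases k with
    | zero => simp [List.getD]
    | succ k => simp [List.take_succ_cons, List.sum_cons, ih k, List.getD]; ring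

theorem Bfold (s : List Int) (m : Int) (k : Nat) (hk : 1 ≤ k) :
    (PySem.List.pyRange 1 (k : Int) 1).foldl
        (fun t i => t + (m - i + 1) * PySem.List.pyGetD s i 0) (m * PySem.List.pyGetD s 0 0)
      = Dval s k + (m - (k : Int)) * (s.take k).sum := by
  induction k with
  | zero => omega
  | succ k ih =>
    cases Nat.eq_or_lt_of_le hk with
    | inl h1 =>
      -- k + 1 = 1
      have hk0 : k = 0 := by omega
      subst hk0
      have : PySem.List.pyRange 1 ((1 : Nat) : Int) 1 = [] := by
        apply PySem.List.pyRange_one_eq_nil; norm_num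
      rw [this]
      have h10 : (s.take 1).sum = s.getD 0 0 := by cases s <;> simp [List.getD]
      simp only [List.foldl_nil, Dval, PySem.List.pyGetD_zero, h10]
      push_cast
      ring
    | inr h1 =>
      have hk1 : 1 ≤ k := by omega
      have hsplit : PySem.List.pyRange 1 (((k : Nat) + 1 : Nat) : Int) 1
          = PySem.List.pyRange 1 (k : Int) 1 ++ [(k : Int)] := by
        push_cast
        exact PySem.List.pyRange_one_succ_right (by exact_mod_cast hk1)
      rw [hsplit, List.foldl_append, ih hk1]
      simp only [List.foldl_cons, List.foldl_nil, PySem.List.pyGetD_natCast]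
      show Dval s k + (m - (k : Int)) * (s.take k).sum + (m - (k : Int) + 1) * s.getD k 0
          = Dval s (k + 1) + (m - ((k : Nat) + 1 : Nat)) * (s.take (k + 1)).sum
      rw [Dval, take_succ_sum]
      push_cast
      ring

theorem Afold (s : List Int) (k : Nat) (hk : 1 ≤ k) (hkn : k ≤ s.length) :
    ((PySem.List.pyRange 2 ((k : Int) + 1) 1).foldl (stepA s)
        (PySem.List.pySetD (List.replicate (s.length + 1) (0 : Int)) 1 (PySem.List.pyGetD s 0 0),
         PySem.List.pySetD (List.replicate (s.length + 1) (0 : Int)) 1 (PySem.List.pyGetD s 0 0))).1.length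
        = s.length + 1 ∧
    ((PySem.List.pyRange 2 ((k : Int) + 1) 1).foldl (stepA s)
        (PySem.List.pySetD (List.replicate (s.length + 1) (0 : Int)) 1 (PySem.List.pyGetD s 0 0),
         PySem.List.pySetD (List.replicate (s.length + 1) (0 : Int)) 1 (PySem.List.pyGetD s 0 0))).2.length
        = s.length + 1 ∧
    ((PySem.List.pyRange 2 ((k : Int) + 1) 1).foldl (stepA s)
        (PySem.List.pySetD (List.replicate (s.length + 1) (0 : Int)) 1 (PySem.List.pyGetD s 0 0),
         PySem.List.pySetD (List.replicate (s.length + 1) (0 : Int)) 1 (PySem.List.pyGetD s 0 0))).1.getD k 0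
        = Dval s k ∧
    ((PySem.List.pyRange 2 ((k : Int) + 1) 1).foldl (stepA s)
        (PySem.List.pySetD (List.replicate (s.length + 1) (0 : Int)) 1 (PySem.List.pyGetD s 0 0),
         PySem.List.pySetD (List.replicate (s.length + 1) (0 : Int)) 1 (PySem.List.pyGetD s 0 0))).2.getD k 0
        = (s.take k).sum := by
  induction k with
  | zero => omega
  | succ k ih =>
    cases Nat.eq_or_lt_of_le hk with
    | inl h1 =>
      have hk0 : k = 0 := by omega
      subst hk0
      have hnil : PySem.List.pyRange 2 (((0 : Nat) : Int) + 1 + 1) 1 = [] := by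
        apply PySem.List.pyRange_one_eq_nil; norm_num
      have hlen : 1 ≤ s.length := by omega
      rw [show (((0 : Nat) + 1 : Nat) : Int) + 1 = ((0 : Nat) : Int) + 1 + 1 by norm_num, hnil]
      simp only [List.foldl_nil]
      have hset : ∀ v : Int, PySem.List.pySetD (List.replicate (s.length + 1) (0 : Int)) 1 v
          = (List.replicate (s.length + 1) (0 : Int)).set 1 v := by
        intro v
        exact_mod_cast PySem.List.pySetD_natCast (List.replicate (s.length + 1) (0 : Int)) 1 v
      constructor
      · simp [hset]
      constructor
      · simp [hset]
      constructor
      · rw [hset]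
        rw [List.getD_eq_getElem?_getD, List.getElem?_set_self (by simp; omega)]
        simp [Dval, PySem.List.pyGetD_zero]
        cases s with
        | nil => simp at hlen
        | cons a t => simp
      · rw [hset]
        rw [List.getD_eq_getElem?_getD, List.getElem?_set_self (by simp; omega)]
        simp [PySem.List.pyGetD_zero]
        cases s with
        | nil => simp at hlen
        | cons a t => simp
    | inr h1 =>
      have hk1 : 1 ≤ k := by omega
      have hkn' : k ≤ s.length := by omega
      obtain ⟨ih1, ih2, ih3, ih4⟩ := ih hk1 hkn'
      have hsplit : PySem.List.pyRange 2 ((((k : Nat) + 1 : Nat) : Int) + 1) 1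
          = PySem.List.pyRange 2 ((k : Int) + 1) 1 ++ [(k : Int) + 1] := by
        have : (((k : Nat) + 1 : Nat) : Int) + 1 = ((k : Int) + 1) + 1 := by push_cast; ring
        rw [this]
        exact PySem.List.pyRange_one_succ_right (by exact_mod_cast Nat.succ_le_succ hk1)
      rw [hsplit, List.foldl_append]
      set st := (PySem.List.pyRange 2 ((k : Int) + 1) 1).foldl (stepA s)
        (PySem.List.pySetD (List.replicate (s.length + 1) (0 : Int)) 1 (PySem.List.pyGetD s 0 0),
         PySem.List.pySetD (List.replicate (s.length + 1) (0 : Int)) 1 (PySem.List.pyGetD s 0 0)) with hst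
      simp only [List.foldl_cons, List.foldl_nil]
      have hidx : ((k : Int) + 1) - 1 = ((k : Nat) : Int) := by push_cast; ring
      have hcast : ((k : Int) + 1) = (((k + 1 : Nat)) : Int) := by push_cast; ring
      have hlt1 : k + 1 < st.1.length := by omega
      have hlt2 : k + 1 < st.2.length := by omega
      unfold stepA
      rw [hidx, hcast]
      simp only [PySem.List.pyGetD_natCast, PySem.List.pySetD_natCast]
      refine ⟨by simp [ih1], by simp [ih2], ?_, ?_⟩
      · rw [List.getD_eq_getElem?_getD, List.getElem?_set_self hlt1]
        simp only [Option.getD_some]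
        rw [ih3, ih4, Dval, take_succ_sum]
      · rw [List.getD_eq_getElem?_getD, List.getElem?_set_self hlt2]
        simp only [Option.getD_some]
        rw [ih4, take_succ_sum]

-- ===== VERDICT (by name: the statement is the Claim_ definition above) =====
theorem solve_dyn_spec : Claim_equal_solve_dyn := by
  intro arr _ hpre
  unfold Spec_solve_dyn solve_dyn solve_dyn_alt
  set s := PySem.List.sorted arr (fun x => x) true with hs
  have hsne : s ≠ [] := by
    rw [hs]
    simp [PySem.List.sorted_eq_nil_iff]
    exact hpre
  have hn : 1 ≤ s.length := List.length_pos_of_ne_nil hsne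
  obtain ⟨h1, h2, h3, h4⟩ := Afold s s.length hn le_rfl
  simp only []
  rw [PySem.List.pyGetD_natCast, h3,
    Bfold s (s.length : Int) s.length hn]
  simp
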